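-- pv_equiv track=rewrite | github.com/paulossjunior/onestep-static | scripts/remove_cpf_from_json.py | remove_pii_fields
-- ===== SOURCE A (Python) =====
-- def remove_pii_fields(data, fields_to_remove):
--     """Remove PII fields from all scholarship records."""
--
--     removed_count = 0
--
--     for scholarship in data['scholarships']:
--         for field in fields_to_remove:
--             if field in scholarship:
--                 del scholarship[field]
--                 removed_count += 1
--
--     return removed_count
-- ===== SOURCE B (Python) =====
-- def remove_pii_fields(data, fields_to_remove):
--     """Remove PII fields from all scholarship records.
--
--     Inverted traversal: build the field set once, then scan each
--     scholarship's keys once, collecting the keys to delete.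
--     (Mutates the scholarship dicts in place, like the original.)
--     """
--     fieldset = set(fields_to_remove)
--     total = 0
--     for scholarship in data['scholarships']:
--         doomed = [k for k in scholarship if k in fieldset]
--         total += len(doomed)
--         for k in doomed:
--             del scholarship[k]
--     return total
-- ===== Notes on version B (the rewrite author's own statement) =====
-- stated objective: faster
-- what changed: Inverts the loop nesting: instead of testing every field of fields_to_remove against each scholarship, B builds the field set once and scans each scholarship's keys once, deleting the matching keys and counting them with len.
import Mathlib
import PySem

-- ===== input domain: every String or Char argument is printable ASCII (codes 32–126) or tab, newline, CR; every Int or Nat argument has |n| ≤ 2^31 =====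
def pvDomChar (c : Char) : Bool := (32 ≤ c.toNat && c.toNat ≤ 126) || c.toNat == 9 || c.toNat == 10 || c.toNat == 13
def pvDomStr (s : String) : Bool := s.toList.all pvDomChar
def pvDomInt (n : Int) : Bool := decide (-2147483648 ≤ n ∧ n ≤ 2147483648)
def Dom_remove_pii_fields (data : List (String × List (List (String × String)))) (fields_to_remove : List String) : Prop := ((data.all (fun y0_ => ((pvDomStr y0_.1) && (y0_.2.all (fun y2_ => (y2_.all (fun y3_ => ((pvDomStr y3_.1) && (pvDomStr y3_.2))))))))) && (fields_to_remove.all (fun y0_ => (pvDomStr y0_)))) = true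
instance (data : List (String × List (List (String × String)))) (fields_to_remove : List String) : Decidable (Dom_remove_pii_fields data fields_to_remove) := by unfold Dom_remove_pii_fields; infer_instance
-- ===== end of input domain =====

-- B inverts the loop nesting: a field set built once and one scan of each scholarship's keys
-- replaces A's per-field membership-test-and-delete loop (constant-factor faster; the equivalence
-- is about the RETURN value only — both Pythons mutate the scholarship dicts identically).


-- ===== PORT A =====
def remove_pii_fields (data : List (String × List (List (String × String)))) (fields_to_remove : List String) : Int :=
  match PySem.Dict.get? (PySem.Dict.mk data) "scholarships" with
  | none => 0      -- Python raises KeyError here; excluded by Pre_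
  | some schs =>
    schs.foldl (fun acc sch =>
      (fields_to_remove.foldl
        (fun (st : PySem.Dict String String × Int) field =>
          if PySem.Dict.contains st.1 field
          then (PySem.Dict.erase st.1 field, st.2 + 1)
          else st)
        (PySem.Dict.mk sch, acc)).2) 0

-- ===== PORT B =====
-- (B's deletion loop 'for k in doomed: del scholarship[k]' mutates only the local dict and does
--  not contribute to the returned count, so it has no counterpart in this pure port.)
def remove_pii_fields_alt (data : List (String × List (List (String × String)))) (fields_to_remove : List String) : Int :=
  let fieldset := PySem.Set.ofList fields_to_remove
  match PySem.Dict.get? (PySem.Dict.mk data) "scholarships" with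
  | none => 0      -- Python raises KeyError here; excluded by Pre_
  | some schs =>
    schs.foldl (fun acc sch =>
      let doomed := (PySem.Dict.mk sch).keys.filter (fun k => PySem.Set.contains fieldset k)
      acc + (doomed.length : Int)) 0

-- ===== PRECONDITION & SPEC =====
-- Pre_ excludes (a) data without a 'scholarships' key, on which the Python A raises KeyError
-- (and B raises it too), and (b) association lists in which some scholarship has duplicate keys:
-- those represent no Python dict (a dict's keys are unique), so nothing is claimed about them.
def Pre_remove_pii_fields (data : List (String × List (List (String × String)))) (fields_to_remove : List String) : Prop :=
  (PySem.Dict.get? (PySem.Dict.mk data) "scholarships").any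
    (fun schs => schs.all (fun sch => decide (sch.map Prod.fst).Nodup)) = true
instance (data : List (String × List (List (String × String)))) (fields_to_remove : List String) : Decidable (Pre_remove_pii_fields data fields_to_remove) := by unfold Pre_remove_pii_fields; infer_instance

def pvWitness_remove_pii_fields : (List (String × List (List (String × String)))) × List String :=
  ([("scholarships", [[("cpf", "123"), ("name", "ana")], [("name", "bob")]])], ["cpf", "rg"])

def Spec_remove_pii_fields (data : List (String × List (List (String × String)))) (fields_to_remove : List String) (out : Int) : Prop := out = remove_pii_fields_alt data fields_to_remove
instance (data : List (String × List (List (String × String)))) (fields_to_remove : List String) (out : Int) : Decidable (Spec_remove_pii_fields data fields_to_remove out) := by unfold Spec_remove_pii_fields; infer_instance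

-- ===== CLAIM (what is proved, stated in full; the proofs are below) =====
def Claim_equal_remove_pii_fields : Prop := ∀ (data : List (String × List (List (String × String)))) (fields_to_remove : List String), Dom_remove_pii_fields data fields_to_remove → Pre_remove_pii_fields data fields_to_remove → Spec_remove_pii_fields data fields_to_remove (remove_pii_fields data fields_to_remove)

-- ===== LEMMAS AND PROOFS =====

-- A's inner loop over fields_to_remove, started on a dict with Nodup keys, counts exactly the
-- keys of the dict that occur in fields_to_remove.
theorem inner_loop_count (fields : List String) (d : PySem.Dict String String) (c : Int)
    (hd : d.keys.Nodup) :
    (fields.foldl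
      (fun (st : PySem.Dict String String × Int) field =>
        if PySem.Dict.contains st.1 field
        then (PySem.Dict.erase st.1 field, st.2 + 1)
        else st)
      (d, c)).2
    = c + ((d.keys.filter (fun k => fields.contains k)).length : Int) := by
  induction fields generalizing d c with
  | nil => simp
  | cons f rest ih =>
    simp only [List.foldl_cons]
    by_cases h : PySem.Dict.contains d f = true
    · have hf : f ∈ d.keys := (PySem.Dict.contains_iff_mem_keys d f).mp h
      have hkeys : (PySem.Dict.erase d f).keys = d.keys.filter (fun k => !(k == f)) := by
        simp only [PySem.Dict.erase, PySem.Dict.keys, List.filter_map, Function.comp_def]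
      have hnd' : (PySem.Dict.erase d f).keys.Nodup := by
        rw [hkeys]; exact hd.filter _
      have herase : d.keys.filter (fun k => !(k == f)) = d.keys.erase f := by
        rw [List.Nodup.erase_eq_filter hd]
        simp [bne]
      rw [if_pos h, ih _ _ hnd', hkeys, herase]
      have hperm : d.keys.Perm (f :: d.keys.erase f) := List.perm_cons_erase hf
      rw [← List.countP_eq_length_filter, ← List.countP_eq_length_filter,
          hperm.countP_eq (fun k => (f :: rest).contains k), List.countP_cons]
      have hpf : ((f :: rest).contains f : Bool) = true := by simp
      have hcongr : (d.keys.erase f).countP (fun k => (f :: rest).contains k)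
          = (d.keys.erase f).countP (fun k => rest.contains k) := by
        apply List.countP_congr
        intro x hx
        have hxf : x ≠ f := ((List.Nodup.mem_erase_iff hd).mp hx).1
        simp [hxf]
      rw [hcongr, hpf]
      simp
      omega
    · have hf : f ∉ d.keys := by
        intro hmem
        exact h ((PySem.Dict.contains_iff_mem_keys d f).mpr hmem)
      rw [if_neg h, ih _ _ hd]
      have hcongr : d.keys.filter (fun k => rest.contains k)
          = d.keys.filter (fun k => (f :: rest).contains k) := by
        apply List.filter_congr
        intro x hx
        have hxf : x ≠ f := fun e => hf (e ▸ hx)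
        simp [hxf]
      rw [hcongr]

-- ===== VERDICT (by name: the statement is the Claim_ definition above) =====
theorem remove_pii_fields_spec : Claim_equal_remove_pii_fields := by
  intro data fields _ hpre
  unfold Spec_remove_pii_fields remove_pii_fields remove_pii_fields_alt
  unfold Pre_remove_pii_fields at hpre
  cases hget : PySem.Dict.get? (PySem.Dict.mk data) "scholarships" with
  | none => exact absurd hpre (by rw [hget]; simp)
  | some schs =>
    rw [hget] at hpre
    simp only [Option.any_some, List.all_eq_true, decide_eq_true_eq] at hpre
    apply PySem.List.foldl_congr_mem
    intro acc sch hsch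
    have hnd : ((PySem.Dict.mk sch).keys).Nodup := hpre sch hsch
    rw [inner_loop_count fields (PySem.Dict.mk sch) acc hnd]
    have : ((PySem.Dict.mk sch).keys.filter (fun k => fields.contains k))
        = ((PySem.Dict.mk sch).keys.filter (fun k => PySem.Set.contains (PySem.Set.ofList fields) k)) := by
      apply List.filter_congr
      intro x _
      simp [PySem.Set.contains_eq_listContains]
    rw [this]
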